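-- pv_equiv track=rewrite | github.com/Ezrastrading/Ezras-trading-ai | trading-ai/src/trading_ai/nte/execution/routing/integration/spot_quote_utils.py | parse_spot_base_quote
-- ===== SOURCE A (Python) =====
-- from typing import Tuple
--
-- _KNOWN_QUOTE_SUFFIXES = ("USDC", "USD", "EUR", "GBP", "USDT")
--
-- def parse_spot_base_quote(product_id: str) -> Tuple[str, str]:
--     """
--     Parse ``BASE-QUOTE`` (e.g. ``BTC-USD``, ``ETH-USDC``, ``SOL-EUR``).
--
--     Returns ``(base_asset, quote_asset)`` uppercased. Falls back to last ``-`` segment as quote.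
--     """
--     raw = (product_id or "").strip().upper()
--     if not raw or "-" not in raw:
--         return raw or "UNKNOWN", "USD"
--     for suf in _KNOWN_QUOTE_SUFFIXES:
--         if raw.endswith("-" + suf):
--             base = raw[: -(len(suf) + 1)]
--             return base, suf
--     base, _, quote = raw.rpartition("-")
--     return base or raw, quote or "USD"
-- ===== SOURCE B (Python) =====
-- _KNOWN_QUOTE_SUFFIXES = ("USDC", "USD", "EUR", "GBP", "USDT")
--
-- def parse_spot_base_quote(product_id):
--     raw = (product_id or "").strip().upper()
--     if not raw or "-" not in raw:
--         return raw or "UNKNOWN", "USD"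
--     # single forward pass over the characters: `quote` accumulates the segment
--     # after the most recent dash, `base` everything before it
--     base, quote, seen = "", "", False
--     for ch in raw:
--         if ch == "-":
--             base = base + "-" + quote if seen else quote
--             quote = ""
--             seen = True
--         else:
--             quote += ch
--     if quote in _KNOWN_QUOTE_SUFFIXES:
--         return base, quote
--     return base or raw, quote or "USD"
-- ===== Notes on version B (the rewrite author's own statement) =====
-- stated objective: alternative
-- what changed: Replaced the per-suffix endswith scan (loop over _KNOWN_QUOTE_SUFFIXES with slicing, then rpartition) by a single forward character pass with an accumulator state machine (base, quote, seen) that splits at the last dash incrementally, followed by one membership test.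
import Mathlib
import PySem

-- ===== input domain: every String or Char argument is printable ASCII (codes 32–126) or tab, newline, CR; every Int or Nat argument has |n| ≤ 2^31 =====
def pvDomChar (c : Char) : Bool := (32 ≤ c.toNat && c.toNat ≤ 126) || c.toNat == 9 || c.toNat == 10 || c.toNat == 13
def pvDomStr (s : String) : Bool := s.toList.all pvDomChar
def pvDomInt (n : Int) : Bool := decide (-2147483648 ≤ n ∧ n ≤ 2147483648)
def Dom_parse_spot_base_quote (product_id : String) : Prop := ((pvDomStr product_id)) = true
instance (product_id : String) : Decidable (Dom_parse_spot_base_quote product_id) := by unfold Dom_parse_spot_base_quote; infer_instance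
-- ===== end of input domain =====

-- B replaces A's per-suffix endswith scan by one forward character pass with an
-- accumulator state machine (base, quote, seen) plus one membership test (objective: alternative).

-- _KNOWN_QUOTE_SUFFIXES, uppercased ASCII, as char lists
def kqSuffixes : List (List Char) :=
  [['U','S','D','C'], ['U','S','D'], ['E','U','R'], ['G','B','P'], ['U','S','D','T']]

-- ===== PORT A =====
-- the 'for suf in _KNOWN_QUOTE_SUFFIXES' loop with its endswith test and slice
def findSufA (r : List Char) : List (List Char) → Option (List Char × List Char)
  | [] => none
  | suf :: rest =>
    if PySem.Chars.endswith r ('-' :: suf) then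
      some (PySem.List.slice r none (some (-((suf.length : Int) + 1))), suf)
    else findSufA r rest

-- hand port of str.rpartition(sep) for the 1-char sep "-": split at the LAST '-';
-- exact: returns (before, after); when '-' is absent Python gives ('', '', s) i.e. ([], r) here
def rpartDash (r : List Char) : List Char × List Char :=
  match (r.reverse).dropWhile (fun c => c ≠ '-') with
  | [] => ([], r)
  | _ :: tail => (tail.reverse, ((r.reverse).takeWhile (fun c => c ≠ '-')).reverse)

def parse_spot_base_quote (product_id : String) : String × String :=
  let raw := PySem.Str.upper (PySem.Str.strip product_id)
  if raw = "" || !(PySem.Str.isIn "-" raw) then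
    ((if raw = "" then "UNKNOWN" else raw), "USD")
  else
    match findSufA raw.toList kqSuffixes with
    | some (b, q) => (String.ofList b, String.ofList q)
    | none =>
      let p := rpartDash raw.toList
      ((if p.1 = [] then raw else String.ofList p.1), (if p.2 = [] then "USD" else String.ofList p.2))

-- ===== PORT B =====
-- the body of Source B's 'for ch in raw' loop: state = (base, quote, seen)
def stepB (st : List Char × List Char × Bool) (c : Char) : List Char × List Char × Bool :=
  if c = '-' then ((if st.2.2 then st.1 ++ '-' :: st.2.1 else st.2.1), [], true)
  else (st.1, st.2.1 ++ [c], st.2.2)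

def parse_spot_base_quote_alt (product_id : String) : String × String :=
  let raw := PySem.Str.upper (PySem.Str.strip product_id)
  if raw = "" || !(PySem.Str.isIn "-" raw) then
    ((if raw = "" then "UNKNOWN" else raw), "USD")
  else
    let st := raw.toList.foldl stepB ([], [], false)
    if st.2.1 ∈ kqSuffixes then (String.ofList st.1, String.ofList st.2.1)
    else ((if st.1 = [] then raw else String.ofList st.1),
          (if st.2.1 = [] then "USD" else String.ofList st.2.1))

-- ===== PRECONDITION & SPEC =====
def Spec_parse_spot_base_quote (product_id : String) (out : String × String) : Prop := out = parse_spot_base_quote_alt product_id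
instance (product_id : String) (out : String × String) : Decidable (Spec_parse_spot_base_quote product_id out) := by unfold Spec_parse_spot_base_quote; infer_instance

-- ===== CLAIM (what is proved, stated in full; the proofs are below) =====
def Claim_equal_parse_spot_base_quote : Prop := ∀ (product_id : String), Dom_parse_spot_base_quote product_id → Spec_parse_spot_base_quote product_id (parse_spot_base_quote product_id)

-- ===== LEMMAS AND PROOFS =====

-- takeWhile (≠ '-') reads off the dash-free block before a dash
lemma takeWhile_append_dash (a b : List Char) (ha : '-' ∉ a) :
    (a ++ '-' :: b).takeWhile (fun c => c ≠ '-') = a := by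
  induction a with
  | nil => simp
  | cons x xs ih =>
    simp only [List.mem_cons, not_or] at ha
    have hx : ¬ x = '-' := fun h => ha.1 h.symm
    rw [List.cons_append, List.takeWhile_cons, if_pos (by simp [hx]), ih ha.2]

-- dropWhile (≠ '-') skips the dash-free block before a dash
lemma dropWhile_append_dash (a b : List Char) (ha : '-' ∉ a) :
    (a ++ '-' :: b).dropWhile (fun c => c ≠ '-') = '-' :: b := by
  induction a with
  | nil => simp
  | cons x xs ih =>
    simp only [List.mem_cons, not_or] at ha
    have hx : ¬ x = '-' := fun h => ha.1 h.symm
    rw [List.cons_append, List.dropWhile_cons, if_pos (by simp [hx]), ih ha.2]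

-- rpartDash on an explicit last-dash decomposition
lemma rpartDash_append (b q : List Char) (hq : '-' ∉ q) :
    rpartDash (b ++ '-' :: q) = (b, q) := by
  have hrev : (b ++ '-' :: q).reverse = q.reverse ++ '-' :: b.reverse := by simp
  have hq' : '-' ∉ q.reverse := by simpa using hq
  rw [rpartDash, hrev, dropWhile_append_dash _ _ hq', takeWhile_append_dash _ _ hq']
  simp

-- the last dash-free segment characterizes endswith "-"+suf
lemma endswith_iff_quote_eq (base quote suf : List Char)
    (hq : '-' ∉ quote) (hs : '-' ∉ suf) :
    ('-' :: suf) <:+ (base ++ '-' :: quote) ↔ suf = quote := by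
  constructor
  · rintro ⟨t, ht⟩
    have hrev := congrArg List.reverse ht
    simp only [List.reverse_append, List.reverse_cons] at hrev
    have h1 : (suf.reverse ++ '-' :: t.reverse).takeWhile (fun c => c ≠ '-')
        = suf.reverse := takeWhile_append_dash _ _ (by simpa using hs)
    have h2 : (quote.reverse ++ '-' :: base.reverse).takeWhile (fun c => c ≠ '-')
        = quote.reverse := takeWhile_append_dash _ _ (by simpa using hq)
    have : suf.reverse = quote.reverse := by
      rw [← h1, ← h2]
      congr 1
      simpa [List.append_assoc] using hrev
    simpa using congrArg List.reverse this
  · rintro rfl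
    exact ⟨base, rfl⟩

lemma findSufA_eq (base quote : List Char) (hq : '-' ∉ quote) :
    ∀ sufs : List (List Char), (∀ s ∈ sufs, '-' ∉ s) →
    findSufA (base ++ '-' :: quote) sufs =
      if quote ∈ sufs then some (base, quote) else none := by
  intro sufs hsufs
  induction sufs with
  | nil => simp [findSufA]
  | cons suf rest ih =>
    have hs : '-' ∉ suf := hsufs suf (by simp)
    have hrest : ∀ s ∈ rest, '-' ∉ s := fun s hmem => hsufs s (by simp [hmem])
    by_cases hqs : suf = quote
    · subst hqs
      have hend : PySem.Chars.endswith (base ++ '-' :: suf) ('-' :: suf) = true := by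
        rw [PySem.Chars.endswith_iff]
        exact ⟨base, rfl⟩
      have hsl : PySem.List.slice (base ++ '-' :: suf) none
          (some (-((suf.length : Int) + 1))) = base := by
        have hcast : -((suf.length : Int) + 1) = -((suf.length + 1 : Nat) : Int) := by
          push_cast; ring
        rw [hcast, PySem.List.slice_to_neg_natCast _ _ (Nat.succ_pos _)]
        have hlen : (base ++ '-' :: suf).length = base.length + (suf.length + 1) := by
          simp
        rw [hlen, Nat.add_sub_cancel]
        exact List.take_left
      simp only [findSufA]
      rw [if_pos hend, hsl, if_pos (List.mem_cons_self)]
    · have hend : PySem.Chars.endswith (base ++ '-' :: quote) ('-' :: suf) = false := by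
        apply Bool.eq_false_iff.mpr
        intro h
        rw [PySem.Chars.endswith_iff] at h
        exact hqs ((endswith_iff_quote_eq base quote suf hq hs).1 h)
      simp only [findSufA]
      rw [if_neg (by simp [hend]), ih hrest]
      by_cases hm : quote ∈ rest
      · rw [if_pos hm, if_pos (List.mem_cons_of_mem _ hm)]
      · rw [if_neg hm, if_neg (by
          intro hmm
          rcases List.mem_cons.mp hmm with h | h
          · exact hqs h.symm
          · exact hm h)]

lemma kq_dashfree : ∀ s ∈ kqSuffixes, '-' ∉ s := by decide

-- decompose any r containing '-' as base ++ '-' :: quote with quote dash-free, matching rpartDash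
lemma rpart_decomp (r : List Char) (h : '-' ∈ r) :
    ∃ base quote, r = base ++ '-' :: quote ∧ '-' ∉ quote ∧ rpartDash r = (base, quote) := by
  have hrev : '-' ∈ r.reverse := by simpa using h
  set q := r.reverse.takeWhile (fun c => c ≠ '-') with hqdef
  set d := r.reverse.dropWhile (fun c => c ≠ '-') with hddef
  have hsplit : q ++ d = r.reverse := List.takeWhile_append_dropWhile
  have hd_ne : d ≠ [] := by
    intro hnil
    have : '-' ∈ q := by
      have := hsplit; rw [hnil, List.append_nil] at this; rw [this]; exact hrev
    have := List.mem_takeWhile_imp this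
    simp at this
  obtain ⟨x, tail, hx⟩ := List.exists_cons_of_ne_nil hd_ne
  have hxdash : x = '-' := by
    have hhead : (fun c => decide (c ≠ '-')) x = false := by
      have := List.head?_dropWhile_not (fun c => decide (c ≠ '-')) r.reverse
      rw [← hddef, hx] at this
      simpa using this
    simpa using hhead
  have hqdash : '-' ∉ q := by
    intro hmem
    have := List.mem_takeWhile_imp hmem
    simp at this
  refine ⟨tail.reverse, q.reverse, ?_, by simpa using hqdash, ?_⟩
  · have : r = (q ++ d).reverse := by rw [hsplit, List.reverse_reverse]
    rw [this, hx, hxdash]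
    simp
  · rw [rpartDash, ← hddef, hx, hxdash]

-- a dash-free run only extends the quote accumulator
lemma foldl_stepB_dashfree (a : List Char) (ha : '-' ∉ a) :
    ∀ b q (s : Bool), List.foldl stepB (b, q, s) a = (b, q ++ a, s) := by
  induction a with
  | nil => intro b q s; simp
  | cons x xs ih =>
    intro b q s
    simp only [List.mem_cons, not_or] at ha
    have hx : ¬ x = '-' := fun h => ha.1 h.symm
    rw [List.foldl_cons, stepB, if_neg hx]
    rw [ih ha.2]
    simp

-- after the first dash, the fold tracks exactly the last-dash split of what it has read
lemma foldl_stepB_true (rest : List Char) :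
    ∀ b q, '-' ∉ q →
      List.foldl stepB (b, q, true) rest =
        ((rpartDash (b ++ '-' :: (q ++ rest))).1, (rpartDash (b ++ '-' :: (q ++ rest))).2, true) := by
  induction rest with
  | nil =>
    intro b q hq
    rw [List.foldl_nil, List.append_nil, rpartDash_append b q hq]
  | cons c cs ih =>
    intro b q hq
    by_cases hc : c = '-'
    · subst hc
      rw [List.foldl_cons, stepB, if_pos rfl]
      simp only [if_true]
      rw [ih (b ++ '-' :: q) [] (by simp)]
      have : (b ++ '-' :: q) ++ '-' :: ([] ++ cs) = b ++ '-' :: (q ++ '-' :: cs) := by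
        simp
      rw [this]
    · rw [List.foldl_cons, stepB, if_neg hc]
      simp only
      rw [ih b (q ++ [c]) (by
        intro hmem
        rcases List.mem_append.mp hmem with h | h
        · exact hq h
        · simp at h; exact hc h.symm)]
      have : q ++ [c] ++ cs = q ++ c :: cs := by simp
      rw [this]

-- starting state: the fold over any raw containing '-' computes rpartDash raw
lemma foldl_stepB_eq_rpart (r : List Char) (h : '-' ∈ r) :
    List.foldl stepB ([], [], false) r = ((rpartDash r).1, (rpartDash r).2, true) := by
  -- first-dash decomposition
  set a := r.takeWhile (fun c => c ≠ '-') with hadef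
  set d := r.dropWhile (fun c => c ≠ '-') with hddef
  have hsplit : a ++ d = r := List.takeWhile_append_dropWhile
  have hd_ne : d ≠ [] := by
    intro hnil
    have : '-' ∈ a := by
      have := hsplit; rw [hnil, List.append_nil] at this; rw [this]; exact h
    have := List.mem_takeWhile_imp this
    simp at this
  obtain ⟨x, tail, hx⟩ := List.exists_cons_of_ne_nil hd_ne
  have hxdash : x = '-' := by
    have hhead : (fun c => decide (c ≠ '-')) x = false := by
      have := List.head?_dropWhile_not (fun c => decide (c ≠ '-')) r
      rw [← hddef, hx] at this
      simpa using this
    simpa using hhead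
  have hadash : '-' ∉ a := by
    intro hmem
    have := List.mem_takeWhile_imp hmem
    simp at this
  have hr : r = a ++ '-' :: tail := by
    rw [← hsplit, hx, hxdash]
  rw [hr, List.foldl_append, foldl_stepB_dashfree a hadash, List.nil_append,
      List.foldl_cons, stepB, if_pos rfl]
  simp only [Bool.false_eq_true, if_false]
  rw [foldl_stepB_true tail a [] (by simp)]
  simp

-- ===== VERDICT (by name: the statement is the Claim_ definition above) =====
theorem parse_spot_base_quote_spec : Claim_equal_parse_spot_base_quote := by
  intro product_id _
  unfold Spec_parse_spot_base_quote parse_spot_base_quote parse_spot_base_quote_alt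
  dsimp only
  set raw := PySem.Str.upper (PySem.Str.strip product_id) with hraw
  by_cases hguard : (raw = "" || !(PySem.Str.isIn "-" raw)) = true
  · rw [if_pos hguard, if_pos hguard]
  · rw [Bool.not_eq_true] at hguard
    have hng : ¬((decide (raw = "") || !PySem.Str.isIn "-" raw) = true) := by rw [hguard]; simp
    have hin : PySem.Str.isIn "-" raw = true := by
      rcases Bool.or_eq_false_iff.mp hguard with ⟨-, h2⟩
      simpa using h2
    have hmem : '-' ∈ raw.toList := by
      rw [PySem.Str.isIn_iff_infix] at hin
      exact hin.subset (by simp)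
    have hne : ¬ raw = "" := by simpa using (Bool.or_eq_false_iff.mp hguard).1
    obtain ⟨base, quote, hdec, hq, hrp⟩ := rpart_decomp raw.toList hmem
    rw [if_neg hng, if_neg hng, foldl_stepB_eq_rpart raw.toList hmem, hrp]
    rw [hdec, findSufA_eq base quote hq kqSuffixes kq_dashfree]
    by_cases hks : quote ∈ kqSuffixes <;> simp [hks]
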